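-- pv_equiv track=rewrite | github.com/sitaramaprasad-e/Prolifics-Sallimae-scripts | Sallie/tools/maintenance/restoreModelHierarchyFromBackup.py | find_model_in_backup
-- ===== SOURCE A (Python) =====
-- def find_model_in_backup(models_backup, target_model: dict):
--     target_id = target_model.get("id")
--     target_name = target_model.get("name")
--     # Prefer match on id
--     if target_id:
--         for m in models_backup:
--             if m.get("id") == target_id:
--                 return m
--     # Fallback to name
--     if target_name:
--         for m in models_backup:
--             if m.get("name") == target_name:
--                 return m
--     return None
-- ===== SOURCE B (Python) =====
-- def find_model_in_backup(models_backup, target_model: dict):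
--     target_id = target_model.get("id")
--     target_name = target_model.get("name")
--     name_match = None
--     for m in models_backup:
--         if target_id and m.get("id") == target_id:
--             return m
--         if target_name and name_match is None and m.get("name") == target_name:
--             name_match = m
--     return name_match
-- ===== Notes on version B (the rewrite author's own statement) =====
-- stated objective: alternative
-- what changed: The two sequential scans (id pass, then name pass) are fused into a single loop over models_backup that returns an id match immediately and records the first name match as a fallback returned after the loop.
import Mathlib
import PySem

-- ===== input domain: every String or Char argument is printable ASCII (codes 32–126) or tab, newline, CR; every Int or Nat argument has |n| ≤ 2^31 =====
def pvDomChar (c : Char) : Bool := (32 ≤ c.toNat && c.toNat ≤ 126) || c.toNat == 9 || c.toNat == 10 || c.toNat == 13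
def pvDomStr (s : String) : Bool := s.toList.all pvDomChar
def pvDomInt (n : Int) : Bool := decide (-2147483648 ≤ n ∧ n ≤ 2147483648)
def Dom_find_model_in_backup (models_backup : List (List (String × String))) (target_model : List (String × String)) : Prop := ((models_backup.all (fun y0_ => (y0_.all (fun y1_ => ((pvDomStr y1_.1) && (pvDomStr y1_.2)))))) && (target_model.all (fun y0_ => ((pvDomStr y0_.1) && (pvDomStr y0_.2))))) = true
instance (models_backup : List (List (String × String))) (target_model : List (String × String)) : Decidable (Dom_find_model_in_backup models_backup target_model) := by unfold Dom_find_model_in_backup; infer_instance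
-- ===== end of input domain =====

-- ===== PORT A =====
-- B fuses A's two scans into one loop with a recorded name fallback (objective: alternative decomposition, same cost).
-- dict.get(k) on an association list: first match (shared lookup primitive of both ports)
def dictGet? : List (String × String) → String → Option String
  | [], _ => none
  | (k, v) :: rest, key => if k == key then some v else dictGet? rest key

-- Python truthiness of target_id / target_name (a string or absent): some non-empty string
def optTruthy : Option String → Bool
  | none => false
  | some s => !(s == "")

def find_model_in_backup (models_backup : List (List (String × String))) (target_model : List (String × String)) : Option (List (String × String)) :=
  let target_id := dictGet? target_model "id"
  let target_name := dictGet? target_model "name"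
  match (if optTruthy target_id then models_backup.find? (fun m => dictGet? m "id" == target_id) else none) with
  | some m => some m
  | none =>
    if optTruthy target_name then models_backup.find? (fun m => dictGet? m "name" == target_name)
    else none

-- ===== PORT B =====
-- single pass: return an id match at once; remember the first name match and return it after the loop
def altLoop (target_id target_name : Option String) (name_match : Option (List (String × String))) : List (List (String × String)) → Option (List (String × String))
  | [] => name_match
  | m :: rest =>
    if optTruthy target_id && (dictGet? m "id" == target_id) then some m
    else if optTruthy target_name && name_match.isNone && (dictGet? m "name" == target_name) then
      altLoop target_id target_name (some m) rest
    else altLoop target_id target_name name_match rest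

def find_model_in_backup_alt (models_backup : List (List (String × String))) (target_model : List (String × String)) : Option (List (String × String)) :=
  altLoop (dictGet? target_model "id") (dictGet? target_model "name") none models_backup

-- ===== PRECONDITION & SPEC =====
def Spec_find_model_in_backup (models_backup : List (List (String × String))) (target_model : List (String × String)) (out : Option (List (String × String))) : Prop := out = find_model_in_backup_alt models_backup target_model
instance (models_backup : List (List (String × String))) (target_model : List (String × String)) (out : Option (List (String × String))) : Decidable (Spec_find_model_in_backup models_backup target_model out) := by unfold Spec_find_model_in_backup; infer_instance

-- ===== CLAIM =====
def Claim_equal_find_model_in_backup : Prop := ∀ (models_backup : List (List (String × String))) (target_model : List (String × String)), Dom_find_model_in_backup models_backup target_model → Spec_find_model_in_backup models_backup target_model (find_model_in_backup models_backup target_model)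

-- ===== LEMMAS AND PROOFS =====
theorem altLoop_eq (target_id target_name : Option String)
    (mb : List (List (String × String))) (nm : Option (List (String × String))) :
    altLoop target_id target_name nm mb =
      match (if optTruthy target_id then mb.find? (fun m => dictGet? m "id" == target_id) else none) with
      | some m => some m
      | none =>
        if optTruthy target_name then
          nm.or (mb.find? (fun m => dictGet? m "name" == target_name))
        else nm := by
  induction mb generalizing nm with
  | nil => simp [altLoop]
  | cons m rest ih =>
    simp only [altLoop, List.find?]
    by_cases hid : (optTruthy target_id && (dictGet? m "id" == target_id)) = true
    · obtain ⟨h1, h2⟩ := Bool.and_eq_true_iff.mp hid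
      simp [h1, h2]
    · rw [if_neg hid]
      by_cases hn : (optTruthy target_name && nm.isNone && (dictGet? m "name" == target_name)) = true
      · obtain ⟨⟨h1, h2⟩, h3⟩ := by
          simpa [Bool.and_eq_true_iff] using hn
        rw [if_pos hn, ih]
        rcases hti : optTruthy target_id with _ | _
        · simp only [Bool.false_eq_true, if_false]
          cases nm with
          | none => simp [h1, h3]
          | some v => simp at h2
        · simp only [if_true]
          have hmid : (dictGet? m "id" == target_id) = false := by
            cases hx : (dictGet? m "id" == target_id) with
            | false => rfl
            | true => exact absurd (by simp [hti, hx]) hid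
          simp only [hmid]
          cases rest.find? (fun m => dictGet? m "id" == target_id) with
          | some v => simp
          | none =>
            cases nm with
            | none => simp [h1, h3]
            | some v => simp at h2
      · rw [if_neg hn, ih]
        rcases hti : optTruthy target_id with _ | _
        · simp only [Bool.false_eq_true, if_false]
          rcases htn : optTruthy target_name with _ | _
          · simp
          · cases nm with
            | some v => simp [Option.or]
            | none =>
              have h3 : (dictGet? m "name" == target_name) = false := by
                cases hx : (dictGet? m "name" == target_name) with
                | false => rfl
                | true => exact absurd (by simp [htn, hx]) hn
              simp [h3]
        · simp only [if_true]
          have hmid : (dictGet? m "id" == target_id) = false := by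
            cases hx : (dictGet? m "id" == target_id) with
            | false => rfl
            | true => exact absurd (by simp [hti, hx]) hid
          simp only [hmid]
          cases rest.find? (fun m => dictGet? m "id" == target_id) with
          | some v => simp
          | none =>
            rcases htn : optTruthy target_name with _ | _
            · simp
            · cases nm with
              | some v => simp [Option.or]
              | none =>
                have h3 : (dictGet? m "name" == target_name) = false := by
                  cases hx : (dictGet? m "name" == target_name) with
                  | false => rfl
                  | true => exact absurd (by simp [htn, hx]) hn
                simp [h3]

-- ===== VERDICT =====
theorem find_model_in_backup_spec : Claim_equal_find_model_in_backup := by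
  intro mb tm _
  unfold Spec_find_model_in_backup find_model_in_backup find_model_in_backup_alt
  rw [altLoop_eq]
  simp only [Option.none_or]
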